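-- pv_equiv track=rewrite | github.com/varlogtim/xcalar-idl | assets/extensions/ext-available/stock.ext.py | transpose
-- ===== SOURCE A (Python) =====
-- def transpose(inp, ins):
--     first = True
--     second = True
--     record = {}
--     record["symbol"] = inp[inp.rfind("/") + 1:inp.rfind(".")]
--     closes = []
--     rowNum = 1
--     for row in ins:
--         if first:
--             first = False
--             continue
--         vals = row.split(",")
--         colName = vals[0]
--         if second:
--             second = False
--             record["lastDate"] = colName
--         close = vals[4]
--         closes.append(close)
--         rowNum += 1
--     record["values"] = ",".join(closes)
--     yield record
-- ===== SOURCE B (Python) =====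
-- def transpose(inp, ins):
--     record = {}
--     record["symbol"] = inp[inp.rfind("/") + 1:inp.rfind(".")]
--     table = [row.split(",") for row in ins[1:]]
--     cols = list(zip(*table))
--     if cols:
--         record["lastDate"] = cols[0][0]
--         closes = cols[4]
--     else:
--         closes = ()
--     record["values"] = ",".join(closes)
--     yield record
-- ===== Notes on version B (the rewrite author's own statement) =====
-- stated objective: alternative
-- what changed: B builds the whole split table for the data rows, transposes it with zip(*table) and reads entire columns (head of column 0 for lastDate, column 4 for the closes), replacing A's row-by-row loop threaded with first/second boolean flags.
import Mathlib
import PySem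

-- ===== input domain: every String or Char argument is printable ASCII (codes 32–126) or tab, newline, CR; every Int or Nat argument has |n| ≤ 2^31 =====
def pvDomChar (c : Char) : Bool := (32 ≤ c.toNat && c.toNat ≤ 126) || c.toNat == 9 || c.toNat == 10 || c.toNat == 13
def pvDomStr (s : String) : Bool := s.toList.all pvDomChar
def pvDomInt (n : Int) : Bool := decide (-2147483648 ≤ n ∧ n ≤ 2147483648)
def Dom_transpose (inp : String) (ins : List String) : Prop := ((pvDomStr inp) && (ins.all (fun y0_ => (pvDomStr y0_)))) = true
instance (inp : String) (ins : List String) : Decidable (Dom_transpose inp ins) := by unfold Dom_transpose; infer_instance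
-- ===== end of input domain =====

-- B replaces A's row-by-row loop with first/second flags by a columnar computation:
-- split all data rows into a table, transpose it with zip(*table), and read whole
-- columns (head of column 0 = lastDate, column 4 = the closes).  A is a generator;
-- list(transpose(inp, ins)) yields exactly one dict, ported as a one-element List of
-- association lists (insertion order).

-- ===== PORT A =====
-- the for-loop of A, with its `first`/`second` flags as state; `none` = IndexError raised
def transposeLoopA (rows : List String) (first second : Bool)
    (record : PySem.Dict String String) (closes : List String) :
    Option (PySem.Dict String String × List String) :=
  match rows with
  | [] => some (record, closes)
  | row :: rest =>
    if first then
      transposeLoopA rest false second record closes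
    else
      match PySem.Str.split? row "," with
      | none => none  -- unreachable: the separator is the non-empty literal ","
      | some vals =>
        match PySem.List.pyGet? vals 0 with
        | none => none  -- IndexError (unreachable: a split is never empty)
        | some colName =>
          let record := if second then record.insert "lastDate" colName else record
          match PySem.List.pyGet? vals 4 with
          | none => none  -- IndexError
          | some close => transposeLoopA rest false false record (closes ++ [close])

def transpose (inp : String) (ins : List String) : List (List (String × String)) :=
  -- record["symbol"] = inp[inp.rfind("/") + 1 : inp.rfind(".")]
  let record : PySem.Dict String String := (PySem.Dict.empty).insert "symbol"
    (PySem.Str.slice inp (some (PySem.Str.rfind inp "/" + 1)) (some (PySem.Str.rfind inp ".")))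
  match transposeLoopA ins true true record [] with
  | none => []  -- the generator raised; excluded by Pre_transpose
  | some (record, closes) =>
    [(record.insert "values" (PySem.Str.join "," closes)).items]

-- ===== PORT B =====
-- list(zip(*rows)): columns up to the shortest row (Python's zip truncation); exact for
-- lists of lists (the default "" is never read: j ranges below every row's length)
def pvZipStar (rows : List (List String)) : List (List String) :=
  match rows with
  | [] => []
  | r0 :: rest =>
    let n := rest.foldl (fun m r => min m r.length) r0.length
    (List.range n).map (fun j => (r0 :: rest).map (fun r => r.getD j ""))

def transpose_alt (inp : String) (ins : List String) : List (List (String × String)) :=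
  let symbol := PySem.Str.slice inp (some (PySem.Str.rfind inp "/" + 1)) (some (PySem.Str.rfind inp "."))
  -- table = [row.split(",") for row in ins[1:]]
  match (ins.drop 1).mapM (fun row => PySem.Str.split? row ",") with
  | none => []  -- unreachable: the separator is the non-empty literal ","
  | some table =>
    let cols := pvZipStar table  -- cols = list(zip(*table))
    if cols.isEmpty then
      [[("symbol", symbol), ("values", PySem.Str.join "," [])]]
    else
      match (PySem.List.pyGet? cols 0).bind (fun c0 => PySem.List.pyGet? c0 0) with
      | none => []  -- unreachable: every column has one entry per row
      | some lastDate =>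
        match PySem.List.pyGet? cols 4 with
        | none => []  -- IndexError on cols[4]; excluded by Pre_transpose
        | some c4 =>
          [[("symbol", symbol), ("lastDate", lastDate),
            ("values", PySem.Str.join "," c4)]]

-- ===== PRECONDITION & SPEC =====
-- Pre_ excludes exactly the inputs on which A's generator raises IndexError: a data row
-- (any row after the header) with fewer than 5 comma-separated fields.
def Pre_transpose (inp : String) (ins : List String) : Prop :=
  ∀ row ∈ ins.tail, 5 ≤ ((PySem.Str.split? row ",").getD []).length
instance (inp : String) (ins : List String) : Decidable (Pre_transpose inp ins) := by
  unfold Pre_transpose; infer_instance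

def pvWitness_transpose : String × List String :=
  ("p/q.csv", ["Date,Open,High,Low,Close", "2020-01-02,1,2,3,9", "2020-01-03,1,2,3,8"])

def Spec_transpose (inp : String) (ins : List String) (out : List (List (String × String))) : Prop := out = transpose_alt inp ins
instance (inp : String) (ins : List String) (out : List (List (String × String))) : Decidable (Spec_transpose inp ins out) := by unfold Spec_transpose; infer_instance

-- ===== CLAIM (what is proved, stated in full; the proofs are below) =====
def Claim_equal_transpose : Prop := ∀ (inp : String) (ins : List String), Dom_transpose inp ins → Pre_transpose inp ins → Spec_transpose inp ins (transpose inp ins)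

-- ===== LEMMAS AND PROOFS =====

-- proof-side abbreviation for row.split(",")
def pvSplit (r : String) : List String :=
  (PySem.Chars.splitOn r.toList [',']).map String.ofList

-- the separator is the non-empty literal ",", so split? always returns some
theorem split_comma (s : String) :
    PySem.Str.split? s "," = some (pvSplit s) := by
  simp [PySem.Str.split?, PySem.Chars.split?, pvSplit]

-- List.mapM of a `some`-valued function (what B's table construction becomes after split_comma)
theorem mapM_some (rows : List String) (f : String → List String) :
    List.mapM (fun row => some (f row)) rows = some (rows.map f) := by
  induction rows with
  | nil => rfl
  | cons r rs ih => simp [List.mapM_cons, ih]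

theorem foldl_min_ge (ts : List (List String)) (a : Nat) (ha : 5 ≤ a)
    (h : ∀ t ∈ ts, 5 ≤ t.length) :
    5 ≤ ts.foldl (fun m r => min m r.length) a := by
  induction ts generalizing a with
  | nil => exact ha
  | cons t ts ih =>
    exact ih (min a t.length) (le_min ha (h t (by simp)))
      (fun x hx => h x (by simp [hx]))

theorem pyGet?_split_zero (row : String) (h : 5 ≤ (pvSplit row).length) :
    PySem.List.pyGet? (pvSplit row) 0 = some ((pvSplit row).getD 0 "") := by
  rw [List.getD_eq_getElem _ _ (by omega : (0:Nat) < (pvSplit row).length)]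
  exact_mod_cast PySem.List.pyGet?_ofNat (pvSplit row) 0 (by omega)

theorem pyGet?_split_four (row : String) (h : 5 ≤ (pvSplit row).length) :
    PySem.List.pyGet? (pvSplit row) 4 = some ((pvSplit row).getD 4 "") := by
  rw [List.getD_eq_getElem _ _ (by omega : (4:Nat) < (pvSplit row).length)]
  exact_mod_cast PySem.List.pyGet?_ofNat (pvSplit row) 4 (by omega)

-- A's loop after the header and the first data row (first = second = false):
-- it appends column 4 of each remaining row
theorem loopA_rest (rows : List String)
    (h : ∀ r ∈ rows, 5 ≤ (pvSplit r).length)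
    (record : PySem.Dict String String) (closes : List String) :
    transposeLoopA rows false false record closes =
      some (record, closes ++ rows.map (fun r => (pvSplit r).getD 4 "")) := by
  induction rows generalizing closes with
  | nil => simp [transposeLoopA]
  | cons row rest ih =>
    have hlen : 5 ≤ (pvSplit row).length := h row (by simp)
    show (match PySem.Str.split? row "," with
      | none => none
      | some vals =>
        match PySem.List.pyGet? vals 0 with
        | none => none
        | some colName =>
          match PySem.List.pyGet? vals 4 with
          | none => none
          | some close => transposeLoopA rest false false record (closes ++ [close])) = _
    simp only [split_comma]
    rw [pyGet?_split_zero row hlen, pyGet?_split_four row hlen]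
    simp [ih (fun x hx => h x (by simp [hx]))]

-- A's loop on the data rows (first = false, second = true): the first row supplies
-- lastDate and its close, the rest their closes
theorem loopA_data (row : String) (rest : List String)
    (h : ∀ r ∈ row :: rest, 5 ≤ (pvSplit r).length)
    (record : PySem.Dict String String) :
    transposeLoopA (row :: rest) false true record [] =
      some (record.insert "lastDate" ((pvSplit row).getD 0 ""),
        (pvSplit row).getD 4 "" :: rest.map (fun r => (pvSplit r).getD 4 "")) := by
  have hlen : 5 ≤ (pvSplit row).length := h row (by simp)
  show (match PySem.Str.split? row "," with
    | none => none
    | some vals =>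
      match PySem.List.pyGet? vals 0 with
      | none => none
      | some colName =>
        match PySem.List.pyGet? vals 4 with
        | none => none
        | some close =>
          transposeLoopA rest false false (record.insert "lastDate" colName) ([] ++ [close])) = _
  simp only [split_comma]
  rw [pyGet?_split_zero row hlen, pyGet?_split_four row hlen]
  simp [loopA_rest rest (fun x hx => h x (by simp [hx]))]

theorem pyGet?_map_range {α : Type} (g : Nat → α) (n k : Nat) (hk : k < n) :
    PySem.List.pyGet? ((List.range n).map g) (k : Int) = some (g k) := by
  simp [PySem.List.pyGet?_natCast, List.getElem?_map, List.getElem?_range hk]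

-- ===== VERDICT (by name: the statement is the Claim_ definition above) =====
theorem transpose_spec : Claim_equal_transpose := by
  intro inp ins _ hpre
  unfold Spec_transpose
  match ins with
  | [] => rfl
  | [h] => rfl
  | h :: row :: rest =>
    have hall : ∀ r ∈ row :: rest, 5 ≤ (pvSplit r).length := by
      intro r hr
      have := hpre r (by simpa using hr)
      rwa [split_comma, Option.getD_some] at this
    have h0 : 5 ≤ (pvSplit row).length := hall row (by simp)
    show transpose inp (h :: row :: rest) = transpose_alt inp (h :: row :: rest)
    unfold transpose transpose_alt
    dsimp only
    -- A side: the header step is definitional; then the data loop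
    rw [show ∀ r c, transposeLoopA (h :: row :: rest) true true r c
        = transposeLoopA (row :: rest) false true r c from fun _ _ => rfl]
    rw [loopA_data row rest hall]
    -- B side: the split table, then the transposed columns
    simp only [List.drop_one, List.tail_cons, split_comma, mapM_some, pvZipStar, List.map_cons]
    set n := (rest.map pvSplit).foldl (fun m r => min m r.length) (pvSplit row).length with hn
    have h5n : 5 ≤ n := foldl_min_ge _ _ h0 (by simpa using fun x hx => hall x (by simp [hx]))
    set g := fun j => (pvSplit row).getD j "" :: List.map (fun r => r.getD j "") (List.map pvSplit rest) with hg
    have hne : ((List.range n).map g).isEmpty = false := by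
      simp [List.isEmpty_eq_false_iff, List.range_eq_nil]; omega
    rw [hne]
    have hc0 : PySem.List.pyGet? ((List.range n).map g) 0 = some (g 0) := by
      exact_mod_cast pyGet?_map_range g n 0 (by omega)
    have hc4 : PySem.List.pyGet? ((List.range n).map g) 4 = some (g 4) := by
      exact_mod_cast pyGet?_map_range g n 4 (by omega)
    rw [hc0, hc4]
    simp only [hg, Option.bind_some, PySem.List.pyGet?_zero_cons]
    simp [PySem.Dict.insert, PySem.Dict.empty, PySem.Dict.contains,
      List.map_map, Function.comp_def]
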